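-- pv_equiv track=rewrite | github.com/shaikhalvee/calender-python | Calander.py | firstday
-- ===== SOURCE A (Python) =====
-- def leapyear(num):          # Checks about leapyear.
--     if num % 4 == 0 and num % 100 != 0:
--         return 1
--     elif num % 400 == 0:
--         return 1
--     else:
--         return 0
--
-- def firstday(num):          # Finds the first day(number) of a year.
--     ref = 2000
--     day = 0
--     if num > ref:
--         while ref < num:
--             if leapyear(ref):
--                 day = day + 2
--             else:
--                 day = day + 1
--             ref = ref + 1
--         day = day % 7
--     else:
--         while ref > num:
--             if leapyear(num):
--                 day = day + 2
--             else:
--                 day = day + 1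
--             num = num + 1
--         day = 7 - (day % 7)
--     return day
-- ===== SOURCE B (Python) =====
-- # Closed-form: count leap years in a range by floor-division instead of looping year by year.
-- def _h(x):
--     # leap years strictly before year x
--     x -= 1
--     return x // 4 - x // 100 + x // 400
--
-- def firstday(num):          # Finds the first day(number) of a year.
--     if num > 2000:
--         return ((num - 2000) + (_h(num) - _h(2000))) % 7
--     return 7 - (((2000 - num) + (_h(2000) - _h(num))) % 7)
-- ===== Notes on version B (the rewrite author's own statement) =====
-- stated objective: faster
-- what changed: Replaces the year-by-year while loops with a closed form: day offsets are (num-2000) plus the leap-year count of the range, computed by floor-division (x//4 - x//100 + x//400), then reduced mod 7.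
import Mathlib
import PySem

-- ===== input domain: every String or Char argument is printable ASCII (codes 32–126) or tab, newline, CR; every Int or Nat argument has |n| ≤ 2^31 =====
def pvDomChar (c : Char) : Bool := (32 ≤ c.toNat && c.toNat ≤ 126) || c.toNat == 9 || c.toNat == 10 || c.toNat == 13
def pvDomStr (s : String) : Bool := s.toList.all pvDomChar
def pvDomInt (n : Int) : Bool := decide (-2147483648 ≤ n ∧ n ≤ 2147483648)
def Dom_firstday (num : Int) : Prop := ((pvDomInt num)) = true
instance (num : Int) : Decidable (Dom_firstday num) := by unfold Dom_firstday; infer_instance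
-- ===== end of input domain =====

-- B replaces A's year-by-year loops with an O(1) closed form (leap-count by floor-division).

-- ===== PORT A =====
def leapyear (num : Int) : Int :=
  if PySem.Int.mod num 4 = 0 ∧ PySem.Int.mod num 100 ≠ 0 then 1
  else if PySem.Int.mod num 400 = 0 then 1
  else 0

-- A's first while loop: ref climbs from 2000 to num
def loopUp (ref num day : Int) : Int :=
  if _h : ref < num then
    loopUp (ref + 1) num (if leapyear ref ≠ 0 then day + 2 else day + 1)
  else day
termination_by (num - ref).toNat
decreasing_by omega

-- A's second while loop: num climbs to 2000
def loopDown (num day : Int) : Int :=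
  if _h : (2000 : Int) > num then
    loopDown (num + 1) (if leapyear num ≠ 0 then day + 2 else day + 1)
  else day
termination_by ((2000 : Int) - num).toNat
decreasing_by omega

def firstday (num : Int) : Int :=
  if num > 2000 then PySem.Int.mod (loopUp 2000 num 0) 7
  else 7 - PySem.Int.mod (loopDown num 0) 7

-- ===== PORT B =====
def hfn (x : Int) : Int :=
  let y := x - 1
  PySem.Int.floordiv y 4 - PySem.Int.floordiv y 100 + PySem.Int.floordiv y 400

def firstday_alt (num : Int) : Int :=
  if num > 2000 then PySem.Int.mod ((num - 2000) + (hfn num - hfn 2000)) 7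
  else 7 - PySem.Int.mod (((2000 : Int) - num) + (hfn 2000 - hfn num)) 7

-- ===== PRECONDITION & SPEC =====
def Spec_firstday (num : Int) (out : Int) : Prop := out = firstday_alt num
instance (num : Int) (out : Int) : Decidable (Spec_firstday num out) := by unfold Spec_firstday; infer_instance

-- ===== CLAIM (what is proved, stated in full; the proofs are below) =====
def Claim_equal_firstday : Prop := ∀ (num : Int), Dom_firstday num → Spec_firstday num (firstday num)

-- ===== LEMMAS AND PROOFS =====

-- one year's step value equals the increment of the closed-form leap counter
lemma leapyear_cases (r : Int) : leapyear r = 0 ∨ leapyear r = 1 := by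
  unfold leapyear; split_ifs <;> simp

lemma leap_step (r : Int) : leapyear r = hfn (r + 1) - hfn r := by
  have h4 := PySem.Int.floordiv_eq_ediv_of_pos (a := r) (b := 4) (by norm_num)
  have h4' := PySem.Int.floordiv_eq_ediv_of_pos (a := r - 1) (b := 4) (by norm_num)
  have h100 := PySem.Int.floordiv_eq_ediv_of_pos (a := r) (b := 100) (by norm_num)
  have h100' := PySem.Int.floordiv_eq_ediv_of_pos (a := r - 1) (b := 100) (by norm_num)
  have h400 := PySem.Int.floordiv_eq_ediv_of_pos (a := r) (b := 400) (by norm_num)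
  have h400' := PySem.Int.floordiv_eq_ediv_of_pos (a := r - 1) (b := 400) (by norm_num)
  have m4 := PySem.Int.mod_eq_emod_of_pos (a := r) (b := 4) (by norm_num)
  have m100 := PySem.Int.mod_eq_emod_of_pos (a := r) (b := 100) (by norm_num)
  have m400 := PySem.Int.mod_eq_emod_of_pos (a := r) (b := 400) (by norm_num)
  simp only [leapyear, hfn, add_sub_cancel_right, m4, m100, m400, h4, h4', h100, h100', h400, h400']
  split_ifs with h1 h2 <;> omega

lemma loopUp_closed (ref num day : Int) (h : ref ≤ num) :
    loopUp ref num day = day + (num - ref) + (hfn num - hfn ref) := by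
  obtain ⟨n, hn⟩ : ∃ n : Nat, num = ref + n := ⟨(num - ref).toNat, by omega⟩
  subst hn
  induction n generalizing ref day with
  | zero => rw [loopUp]; simp
  | succ k ih =>
      rw [loopUp]
      have hlt : ref < ref + (k + 1 : Nat) := by push_cast; omega
      rw [dif_pos hlt]
      have step := leap_step ref
      have hc := leapyear_cases ref
      have : ref + ((k + 1 : Nat) : Int) = (ref + 1) + (k : Nat) := by push_cast; ring
      rw [this, ih (ref + 1) _ (by omega)]
      split_ifs with hl <;> omega

lemma loopDown_closed (num day : Int) (h : num ≤ 2000) :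
    loopDown num day = day + (2000 - num) + (hfn 2000 - hfn num) := by
  obtain ⟨n, hn⟩ : ∃ n : Nat, (2000 : Int) = num + n := ⟨((2000 : Int) - num).toNat, by omega⟩
  induction n generalizing num day with
  | zero =>
      have hnum : num = 2000 := by omega
      subst hnum; rw [loopDown]; simp
  | succ k ih =>
      rw [loopDown]
      have hlt : (2000 : Int) > num := by omega
      rw [dif_pos hlt]
      have step := leap_step num
      have hc := leapyear_cases num
      rw [ih (num + 1) _ (by omega) (by push_cast at hn ⊢; omega)]
      split_ifs with hl <;> omega

-- ===== VERDICT (by name: the statement is the Claim_ definition above) =====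
theorem firstday_spec : Claim_equal_firstday := by
  intro num _
  unfold Spec_firstday firstday firstday_alt
  by_cases h : num > 2000
  · rw [if_pos h, if_pos h, loopUp_closed 2000 num 0 (by omega)]
    ring_nf
  · rw [if_neg h, if_neg h, loopDown_closed num 0 (by omega)]
    ring_nf
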